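-- pv_equiv track=rewrite | github.com/Geunbaek/algorithm | programmers/k진수에서 소수 개수 구하기.py | oper
-- ===== SOURCE A (Python) =====
-- def oper(index, knum):
--     if index >= len(knum):
--         return 0
--
--     ret = ""
--     for i in range(index, len(knum)):
--         if knum[i] == "0":
--             break
--         ret += f"{knum[i]}"
--     return int(ret) if ret else 0
-- ===== SOURCE B (Python) =====
-- def oper(index, knum):
--     s = knum[index:].split("0")[0]
--     return int(s) if s else 0
-- ===== Notes on version B (the rewrite author's own statement) =====
-- stated objective: simpler
-- what changed: A's manual char-by-char accumulate-and-break loop (with an explicit index>=len guard) is replaced by a delimiter partition: slice the tail knum[index:], split it on the sentinel "0" and parse the first piece.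
-- outside the precondition, e.g. on oper(-1, '12'): A returns 212, B returns 2
import Mathlib
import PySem

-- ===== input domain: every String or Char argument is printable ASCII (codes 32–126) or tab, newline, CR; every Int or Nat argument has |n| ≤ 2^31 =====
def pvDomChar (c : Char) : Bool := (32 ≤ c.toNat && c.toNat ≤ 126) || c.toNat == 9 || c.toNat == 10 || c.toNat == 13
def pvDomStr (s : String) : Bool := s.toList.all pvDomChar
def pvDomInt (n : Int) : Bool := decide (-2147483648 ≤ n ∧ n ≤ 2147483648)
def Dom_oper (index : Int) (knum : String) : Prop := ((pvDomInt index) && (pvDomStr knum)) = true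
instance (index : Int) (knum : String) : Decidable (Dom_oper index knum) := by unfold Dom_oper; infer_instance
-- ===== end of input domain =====

-- B replaces A's char-by-char accumulate-and-break loop by slicing the tail knum[index:] and
-- splitting it on the sentinel "0" (objective: simpler, a different decomposition of the scan).

-- ===== PORT A =====
-- the 'for i in range(index, len(knum)): if knum[i]=="0": break; ret += knum[i]' loop;
-- pyGetD's default ' ' is never used on inputs admitted by Pre_oper (index nonnegative there)
def operLoop (cs : List Char) : List Int → List Char → List Char
  | [], ret => ret
  | i :: is, ret =>
    if PySem.List.pyGetD cs i ' ' = '0' then ret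
    else operLoop cs is (ret ++ [PySem.List.pyGetD cs i ' '])

def oper (index : Int) (knum : String) : Int :=
  if index ≥ (knum.toList.length : Int) then 0
  else
    let ret := operLoop knum.toList (PySem.List.pyRange index (knum.toList.length : Int) 1) []
    -- int(ret) if ret else 0 ; ofChars? = none (ValueError) is excluded by Pre_oper
    if ret = [] then 0 else (PySem.Int.ofChars? ret).getD 0

-- ===== PORT B =====
-- s = knum[index:].split("0")[0]; return int(s) if s else 0
def oper_alt (index : Int) (knum : String) : Int :=
  let s := ((PySem.Chars.split? (PySem.List.slice knum.toList (some index) none) ['0']).getD []).headD []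
  -- split? is some (sep "0" is nonempty) and split always returns a nonempty list, so the
  -- getD/headD defaults are never used; ofChars? = none (ValueError) is excluded by Pre_oper
  if s = [] then 0 else (PySem.Int.ofChars? s).getD 0

-- ===== PRECONDITION & SPEC =====
-- the run of characters scanned on admitted inputs (up to the first '0' of the tail knum[index:])
def pvRun (index : Int) (knum : String) : List Char :=
  if 0 ≤ index then (knum.toList.drop index.toNat).takeWhile (· ≠ '0')
  else (knum.toList.drop (knum.toList.length - (-index).toNat)).takeWhile (· ≠ '0')

-- Pre_oper excludes, beyond the inputs where A raises (index < -len(knum): IndexError; a scanned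
-- run that int() rejects: ValueError), the negative in-range indices whose scan meets no '0'
-- before wrapping (no '0' in knum[index:] and knum not starting with '0'), a corner with no
-- meaning for this digit-run parser, where A's value (it scans knum[index], …, knum[-1] and then
-- wraps to the front of the string) and B's value (it reads knum[index:] alone) are both
-- accidental and equally defensible.
def Pre_oper (index : Int) (knum : String) : Prop :=
  (0 ≤ index ∨
    (-(knum.toList.length : Int) ≤ index ∧
      ('0' ∈ knum.toList.drop (knum.toList.length - (-index).toNat) ∨
        knum.toList.headD '0' = '0'))) ∧
  (pvRun index knum = [] ∨ (PySem.Int.ofChars? (pvRun index knum)).isSome = true)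
instance (index : Int) (knum : String) : Decidable (Pre_oper index knum) := by
  unfold Pre_oper; infer_instance

def pvWitness_oper : Int × String := (0, "12")

def Spec_oper (index : Int) (knum : String) (out : Int) : Prop := out = oper_alt index knum
instance (index : Int) (knum : String) (out : Int) : Decidable (Spec_oper index knum out) := by
  unfold Spec_oper; infer_instance

-- ===== CLAIM (what is proved, stated in full; the proofs are below) =====
def Claim_equal_oper : Prop := ∀ (index : Int) (knum : String), Dom_oper index knum → Pre_oper index knum → Spec_oper index knum (oper index knum)

-- ===== LEMMAS AND PROOFS =====

-- B side: splitting on "0" and keeping the first piece is takeWhile (· ≠ '0')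
theorem splitOn_go_acc (fuel : Nat) : ∀ (l cur : List Char) (acc : List (List Char)),
    PySem.Chars.splitOn.go ['0'] fuel l cur acc
      = acc.reverse ++ PySem.Chars.splitOn.go ['0'] fuel l cur [] := by
  induction fuel with
  | zero => intro l cur acc; simp [PySem.Chars.splitOn.go]
  | succ f ih =>
    intro l cur acc
    cases l with
    | nil => simp [PySem.Chars.splitOn.go]
    | cons c rest =>
      simp only [PySem.Chars.splitOn.go]
      split
      · rw [ih _ _ (cur.reverse :: acc), ih _ _ (cur.reverse :: [])]
        simp
      · exact ih _ _ acc

theorem splitOn_go_head (fuel : Nat) : ∀ (l cur : List Char), l.length < fuel →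
    (PySem.Chars.splitOn.go ['0'] fuel l cur []).headD []
      = cur.reverse ++ l.takeWhile (· ≠ '0') := by
  induction fuel with
  | zero => intro l cur h; omega
  | succ f ih =>
    intro l cur h
    cases l with
    | nil => simp [PySem.Chars.splitOn.go]
    | cons c rest =>
      simp only [PySem.Chars.splitOn.go]
      split
      · rename_i hpre
        have hc : c = '0' := by
          have h' := hpre; simp [List.isPrefixOf] at h'; exact h'.symm
        rw [splitOn_go_acc]
        simp [hc]
      · rename_i hpre
        have hc : ¬ c = '0' := by
          have h' := hpre; simp [List.isPrefixOf] at h'; exact fun he => h' he.symm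
        rw [ih rest (c :: cur) (by simpa using Nat.lt_of_succ_lt_succ h)]
        simp [hc]

theorem splitOn_head (s : List Char) :
    (PySem.Chars.splitOn s ['0']).headD [] = s.takeWhile (· ≠ '0') := by
  unfold PySem.Chars.splitOn
  simpa using splitOn_go_head (s.length + 1) s [] (by omega)

-- A side: the loop over range(k, n) scans cs.drop k up to the first '0'
theorem operLoop_nonneg (cs : List Char) : ∀ (d k : Nat) (acc : List Char), k + d = cs.length →
    operLoop cs (PySem.List.pyRange (k : Int) (cs.length : Int) 1) acc
      = acc ++ (cs.drop k).takeWhile (· ≠ '0') := by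
  intro d
  induction d with
  | zero =>
    intro k acc hk
    have hk' : (k : Int) = (cs.length : Int) := by omega
    rw [hk']
    simp [PySem.List.pyRange, operLoop, List.drop_eq_nil_of_le (by omega : cs.length ≤ k)]
  | succ d ih =>
    intro k acc hk
    have hlt : k < cs.length := by omega
    rw [PySem.List.pyRange_one_cons (by exact_mod_cast hlt)]
    have hget : PySem.List.pyGetD cs (k : Int) ' ' = cs[k] := by
      simp [PySem.List.pyGetD_natCast, List.getD_eq_getElem?_getD, hlt]
    have hdrop : cs.drop k = cs[k] :: cs.drop (k + 1) :=
      List.drop_eq_getElem_cons hlt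
    have hcast : (k : Int) + 1 = ((k + 1 : Nat) : Int) := by push_cast; ring
    unfold operLoop
    rw [hget, hdrop]
    by_cases h0 : cs[k] = '0'
    · simp [h0]
    · simp only [if_false, List.takeWhile_cons, h0]
      rw [hcast, ih (k + 1) (acc ++ [cs[k]]) (by omega)]
      simp [h0]

-- the first piece of B's split equals takeWhile on the slice
theorem oper_alt_eq (index : Int) (knum : String) :
    oper_alt index knum
      = (if ((PySem.List.slice knum.toList (some index) none).takeWhile (· ≠ '0')) = []
         then 0
         else (PySem.Int.ofChars? ((PySem.List.slice knum.toList (some index) none).takeWhile (· ≠ '0'))).getD 0) := by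
  unfold oper_alt
  have h1 : (PySem.Chars.split? (PySem.List.slice knum.toList (some index) none) ['0']).getD []
      = PySem.Chars.splitOn (PySem.List.slice knum.toList (some index) none) ['0'] := by
    simp [PySem.Chars.split?]
  rw [h1, splitOn_head]

-- A side, negative start -k: the loop scans cs.drop (n - k) and then wraps over all of cs
theorem operLoop_neg (cs : List Char) : ∀ (k : Nat), k ≤ cs.length → ∀ (acc : List Char),
    operLoop cs (PySem.List.pyRange (-(k : Int)) (cs.length : Int) 1) acc
      = acc ++ ((cs.drop (cs.length - k) ++ cs).takeWhile (· ≠ '0')) := by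
  intro k
  induction k with
  | zero =>
    intro _ acc
    have h := operLoop_nonneg cs cs.length 0 acc (by omega)
    simpa [List.drop_length] using h
  | succ k ih =>
    intro hk acc
    have hlt : (-(↑(k + 1) : Int)) < (cs.length : Int) := by
      push_cast; omega
    rw [PySem.List.pyRange_one_cons hlt]
    have hidx : cs.length - (k + 1) < cs.length := by omega
    have hget : PySem.List.pyGetD cs (-(↑(k + 1) : Int)) ' ' = cs[cs.length - (k + 1)] :=
      PySem.List.pyGetD_neg_natCast cs (k + 1) ' ' (by omega) (by omega)
    have hdrop : cs.drop (cs.length - (k + 1))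
        = cs[cs.length - (k + 1)] :: cs.drop (cs.length - k) := by
      have h1 : cs.length - k = (cs.length - (k + 1)) + 1 := by omega
      rw [h1, List.drop_eq_getElem_cons hidx]
    have hcast : (-(↑(k + 1) : Int)) + 1 = -(↑k : Int) := by push_cast; ring
    unfold operLoop
    rw [hget, hcast, hdrop]
    by_cases h0 : cs[cs.length - (k + 1)] = '0'
    · simp [h0]
    · simp only [h0, if_false]
      rw [ih (by omega) (acc ++ [cs[cs.length - (k + 1)]])]
      simp [h0]

theorem takeWhile_append_of_mem {l₁ l₂ : List Char} (h : '0' ∈ l₁) :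
    (l₁ ++ l₂).takeWhile (· ≠ '0') = l₁.takeWhile (· ≠ '0') := by
  induction l₁ with
  | nil => simp at h
  | cons c rest ih =>
    by_cases hc : c = '0'
    · simp [hc]
    · have hr : '0' ∈ rest := by
        rcases List.mem_cons.mp h with h' | h'
        · exact absurd h'.symm hc
        · exact h'
      simpa [hc] using ih hr

theorem takeWhile_append_of_not_mem {l₁ l₂ : List Char} (h : '0' ∉ l₁) :
    (l₁ ++ l₂).takeWhile (· ≠ '0') = l₁ ++ l₂.takeWhile (· ≠ '0') := by
  induction l₁ with
  | nil => simp
  | cons c rest ih =>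
    have hc : ¬ c = '0' := fun hc => h (by simp [hc])
    have hr : '0' ∉ rest := fun hr => h (by simp [hr])
    simpa [hc] using ih hr

theorem takeWhile_of_not_mem {l : List Char} (h : '0' ∉ l) :
    l.takeWhile (· ≠ '0') = l := by
  simpa using takeWhile_append_of_not_mem (l₂ := ([] : List Char)) h

-- ===== VERDICT (by name: the statement is the Claim_ definition above) =====
theorem oper_spec : Claim_equal_oper := by
  intro index knum _hDom hPre
  show oper index knum = oper_alt index knum
  rw [oper_alt_eq]
  simp only [oper]
  by_cases h0i : 0 ≤ index
  · by_cases hge : index ≥ (knum.toList.length : Int)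
    · -- index past the end: A returns 0, B's slice is empty
      rw [if_pos hge]
      rw [PySem.List.slice_from knum.toList h0i]
      rw [List.drop_eq_nil_of_le (by omega : knum.toList.length ≤ index.toNat)]
      simp
    · -- 0 ≤ index < len: both scan knum[index:] up to the first '0'
      have hlt : index < (knum.toList.length : Int) := lt_of_not_ge hge
      rw [if_neg (by omega)]
      rw [show index = ((index.toNat : Nat) : Int) from (Int.toNat_of_nonneg h0i).symm]
      rw [PySem.List.slice_from knum.toList (by positivity)]
      rw [operLoop_nonneg knum.toList (knum.toList.length - index.toNat) index.toNat [] (by omega)]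
      simp only [List.nil_append, Int.toNat_natCast]
  · -- -len ≤ index < 0 with a '0' before the wrap: both scan knum[index:] up to that '0'
    have hneg : index < 0 := by omega
    rcases hPre.1 with h | hA
    · omega
    obtain ⟨hin, hstop⟩ := hA
    have hkn : (-index).toNat ≤ knum.toList.length := by omega
    have htails : (List.drop (knum.toList.length - (-index).toNat) knum.toList ++ knum.toList).takeWhile (· ≠ '0')
        = (List.drop (knum.toList.length - (-index).toNat) knum.toList).takeWhile (· ≠ '0') := by
      by_cases hmem : '0' ∈ List.drop (knum.toList.length - (-index).toNat) knum.toList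
      · exact takeWhile_append_of_mem hmem
      · have hhead : knum.toList.headD '0' = '0' := by
          rcases hstop with h | h
          · exact absurd h hmem
          · exact h
        rw [takeWhile_append_of_not_mem hmem]
        have htw : knum.toList.takeWhile (· ≠ '0') = [] := by
          cases hcs : knum.toList with
          | nil => simp
          | cons c rest =>
            rw [hcs] at hhead
            simp only [List.headD_cons] at hhead
            simp [hhead]
        rw [htw, List.append_nil]
        exact (takeWhile_of_not_mem hmem).symm
    rw [if_neg (by omega)]
    rw [show index = -(((-index).toNat : Nat) : Int) from by omega]
    rw [operLoop_neg knum.toList (-index).toNat hkn []]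
    rw [PySem.List.slice_from_neg_natCast knum.toList (-index).toNat (by omega)]
    rw [htails]
    simp only [List.nil_append]
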